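-- pv_equiv track=rewrite | github.com/HugoBoulanger/ChatEval-AMT-Interface | python/analysis/agreement.py | annotation_per_annotator2task_data
-- ===== SOURCE A (Python) =====
-- def annotation_per_annotator2task_data(annotations):
--     all_uid = list(annotations)
--     annotators = []
--     data = []
--     for uid, rating_per_annotator in annotations.items():
--         for annotator, rating in rating_per_annotator.items():
--             if annotator not in annotators:
--                 annotators.append(annotator)
--                 data.append([None]*len(all_uid))
--             data[annotators.index(annotator)][all_uid.index(uid)] = rating
--
--     task_data = []
--     for i in range(len(data)):
--         task_data.extend([str(i), str(j), str(data[i][j]) if data[i][j] else None] for j in range(len(data[i])))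
--
--     return task_data
-- ===== SOURCE B (Python) =====
-- def annotation_per_annotator2task_data(annotations):
--     annotators = []
--     for rating_per_annotator in annotations.values():
--         for annotator in rating_per_annotator:
--             if annotator not in annotators:
--                 annotators.append(annotator)
--     task_data = []
--     for i, annotator in enumerate(annotators):
--         for j, (uid, rating_per_annotator) in enumerate(annotations.items()):
--             val = rating_per_annotator.get(annotator)
--             task_data.append([str(i), str(j), str(val) if val else None])
--     return task_data
-- ===== Notes on version B (the rewrite author's own statement) =====
-- stated objective: simpler
-- what changed: B drops A's dense-matrix phase (building a None-row per new annotator, filling cells via list.index scans, then flattening with a second index loop): it collects the annotators in one first-appearance pass and emits each output row directly with a dict lookup of the annotator in the uid's rating dict.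
import Mathlib
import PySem

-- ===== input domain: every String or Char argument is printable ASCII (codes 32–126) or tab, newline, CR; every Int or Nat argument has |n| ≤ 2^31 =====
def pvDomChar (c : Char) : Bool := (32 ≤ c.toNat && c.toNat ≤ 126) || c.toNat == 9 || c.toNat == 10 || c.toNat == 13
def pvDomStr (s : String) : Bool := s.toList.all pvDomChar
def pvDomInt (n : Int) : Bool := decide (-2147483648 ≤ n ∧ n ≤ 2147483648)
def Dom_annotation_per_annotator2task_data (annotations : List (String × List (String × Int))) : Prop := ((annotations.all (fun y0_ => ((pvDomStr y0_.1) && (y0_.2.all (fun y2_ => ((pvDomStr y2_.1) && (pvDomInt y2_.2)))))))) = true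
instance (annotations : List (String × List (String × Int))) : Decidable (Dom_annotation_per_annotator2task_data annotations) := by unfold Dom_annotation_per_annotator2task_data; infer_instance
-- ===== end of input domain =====

-- B replaces A's build-dense-matrix-then-flatten with collecting the annotators once and
-- emitting each output row directly from a dict lookup (objective: simpler; same asymptotic cost).

-- Shared input decoding (the Python argument is a dict of dicts: insertion order, later duplicate key wins):
def pvNorm (annotations : List (String × List (String × Int))) : List (String × PySem.Dict String Int) :=
  (PySem.Dict.ofList annotations).items.map (fun p => (p.1, PySem.Dict.ofList p.2))

-- shared cell rendering: `str(x) if x else None` (both ports contain this expression verbatim)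
def pvConv (c : Option Int) : Option String :=
  match c with
  | some v => if v = 0 then none else some (PySem.Int.toStr v)
  | none => none

-- ===== PORT A =====
-- the body of A's fill loop: membership test/append, then data[annotators.index(annotator)][all_uid.index(uid)] = rating
-- (the `| _, _ =>` arm is unreachable: q.1 was just ensured to be in st1.1 and p.1 ∈ all_uid, so Python's .index cannot raise)
def pvStepA (allUid : List String) (uid : String) (st : List String × List (List (Option Int))) (q : String × Int) :
    List String × List (List (Option Int)) :=
  let st1 := if q.1 ∈ st.1 then st else (st.1 ++ [q.1], st.2 ++ [List.replicate allUid.length (none : Option Int)])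
  match PySem.List.index? st1.1 q.1, PySem.List.index? allUid uid with
  | some i, some j => (st1.1, st1.2.modify i (fun row => row.set j (some q.2)))
  | _, _ => st1

def annotation_per_annotator2task_data (annotations : List (String × List (String × Int))) : List (List (Option String)) :=
  let norm := pvNorm annotations
  let allUid := norm.map Prod.fst
  let st := norm.foldl (fun st p => p.2.items.foldl (pvStepA allUid p.1) st)
    (([] : List String), ([] : List (List (Option Int))))
  -- task_data loop: for i in range(len(data)): extend([str(i), str(j), str(data[i][j]) if data[i][j] else None] for j ...)
  -- (indexing is in range throughout, so getD's default is never used)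
  (List.range st.2.length).flatMap (fun (i : Nat) =>
    (List.range (st.2.getD i []).length).map (fun (j : Nat) =>
      [some (PySem.Int.toStr (i : Int)), some (PySem.Int.toStr (j : Int)), pvConv ((st.2.getD i []).getD j none)]))

-- ===== PORT B =====
-- `if annotator not in annotators: annotators.append(annotator)`
def pvAnnStep (acc : List String) (a : String) : List String := if a ∈ acc then acc else acc ++ [a]

def annotation_per_annotator2task_data_alt (annotations : List (String × List (String × Int))) : List (List (Option String)) :=
  let norm := pvNorm annotations
  let annotators := norm.foldl (fun acc p => p.2.keys.foldl pvAnnStep acc) []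
  (PySem.List.enumerate annotators).flatMap (fun ia =>
    (PySem.List.enumerate norm).map (fun jp =>
      [some (PySem.Int.toStr ia.1), some (PySem.Int.toStr jp.1), pvConv (jp.2.2.get? ia.2)]))

-- ===== PRECONDITION & SPEC =====
def Spec_annotation_per_annotator2task_data (annotations : List (String × List (String × Int))) (out : List (List (Option String))) : Prop := out = annotation_per_annotator2task_data_alt annotations
instance (annotations : List (String × List (String × Int))) (out : List (List (Option String))) : Decidable (Spec_annotation_per_annotator2task_data annotations out) := by unfold Spec_annotation_per_annotator2task_data; infer_instance

-- ===== CLAIM (what is proved, stated in full; the proofs are below) =====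
def Claim_equal_annotation_per_annotator2task_data : Prop := ∀ (annotations : List (String × List (String × Int))), Dom_annotation_per_annotator2task_data annotations → Spec_annotation_per_annotator2task_data annotations (annotation_per_annotator2task_data annotations)

-- ===== LEMMAS AND PROOFS =====

-- Dict.get? is first-match lookup in the items list
lemma pv_get?_eq_find (l : List (String × Int)) (a : String) :
    (PySem.Dict.mk l).get? a = (match l.find? (fun q => q.1 = a) with
      | some q => some q.2
      | none => none) := by
  induction l with
  | nil => simp [PySem.Dict.get?]
  | cons q t ih =>
    by_cases h : q.1 = a
    · simp [PySem.Dict.get?, List.find?, h]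
    · have hb : (q.1 == a) = false := by simpa using h
      simpa [PySem.Dict.get?, List.find?, hb, h] using ih

lemma pv_find?_fst {β : Type} (L : List (String × β)) (h : (L.map Prod.fst).Nodup) (j : Nat) (hj : j < L.length) :
    L.find? (fun p => p.1 = L[j].1) = some L[j] := by
  induction L generalizing j with
  | nil => simp at hj
  | cons p t ih =>
    simp only [List.map_cons, List.nodup_cons] at h
    match j with
    | 0 => simp [List.find?]
    | Nat.succ j =>
      have hjq : j < t.length := by simpa using hj
      have hne : ¬ p.1 = t[j].1 := by
        intro hEq
        exact h.1 (hEq ▸ List.mem_map_of_mem (l := t) (f := Prod.fst) (List.getElem_mem hjq))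
      simpa [List.find?, hne] using ih h.2 j hjq

-- setting a mapped-over-nodup-list at the index of u rewrites the function at u
lemma pv_map_set_index {β : Type} (xs : List String) (hx : xs.Nodup) (u : String) (k : Nat)
    (hk : PySem.List.index? xs u = some k) (f : String → β) (v : β) :
    (xs.map f).set k v = xs.map (fun x => if x = u then v else f x) := by
  obtain ⟨pre, suf, rfl, rfl, hpre⟩ := (PySem.List.index?_eq_some_iff xs u _).1 hk
  have hsuf : u ∉ suf := (List.nodup_cons.1 hx.of_append_right).1
  rw [List.map_append, List.map_cons]
  rw [List.set_append_right _ _ (by simp)]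
  simp only [List.length_map, Nat.sub_self, List.set_cons_zero]
  rw [List.map_append, List.map_cons, if_pos rfl]
  congr 1
  . exact (List.map_congr_left (fun x hxp => by
      rw [if_neg]; intro hEq; exact hpre (hEq ▸ hxp))).symm
  . congr 1
    exact (List.map_congr_left (fun x hxs => by
      rw [if_neg]; intro hEq; exact hsuf (hEq ▸ hxs))).symm

lemma pv_map_modify_index {β : Type} (xs : List String) (hx : xs.Nodup) (u : String) (k : Nat)
    (hk : PySem.List.index? xs u = some k) (f : String → β) (h : β → β) :
    (xs.map f).modify k h = xs.map (fun x => if x = u then h (f x) else f x) := by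
  obtain ⟨hklt, hget, -⟩ := PySem.List.getElem_of_index?_eq_some hk
  have h1 : (xs.map f)[k]? = some (f u) := by
    simp [List.getElem?_map, List.getElem?_eq_getElem hklt, hget]
  rw [List.modify_eq_set_getElem?, h1]
  show (xs.map f).set k (h (f u)) = _
  rw [pv_map_set_index xs hx u k hk f (h (f u))]
  exact List.map_congr_left (fun x hxm => by
    by_cases hxu : x = u <;> simp [hxu])

lemma pv_enumerate_eq {α : Type} (xs : List α) (d : α) (s : Int) :
    PySem.List.enumerate xs s = (List.range xs.length).map (fun (k : Nat) => ((s + (k : Int)), xs.getD k d)) := by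
  induction xs generalizing s with
  | nil => simp [PySem.List.enumerate]
  | cons x t ih =>
    rw [PySem.List.enumerate_cons, ih (s + 1)]
    simp only [List.length_cons, List.range_succ_eq_map, List.map_cons, List.map_map]
    congr 1
    . simp
    . refine List.map_congr_left (fun k _ => ?_)
      simp only [Function.comp, List.getD_cons_succ, Nat.succ_eq_add_one, Prod.mk.injEq]
      constructor
      . push_cast; ring
      . trivial

lemma pv_flatMap_congr {α β : Type} (l : List α) (f g : α → List β) (h : ∀ x ∈ l, f x = g x) :
    l.flatMap f = l.flatMap g := by
  induction l with
  | nil => rfl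
  | cons x t ih =>
    simp only [List.flatMap_cons]
    rw [h x List.mem_cons_self, ih (fun y hy => h y (List.mem_cons_of_mem x hy))]

lemma pv_mem_annStep (acc : List String) (a x : String) :
    x ∈ pvAnnStep acc a ↔ x ∈ acc ∨ x = a := by
  unfold pvAnnStep
  by_cases h : a ∈ acc
  · simp only [if_pos h]
    constructor
    · exact Or.inl
    · rintro (hx | rfl)
      · exact hx
      · exact h
  · simp [if_neg h]

lemma pv_annStep_nodup (acc : List String) (a : String) (h : acc.Nodup) :
    (pvAnnStep acc a).Nodup := by
  unfold pvAnnStep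
  by_cases ha : a ∈ acc
  · simpa [if_pos ha] using h
  · rw [if_neg ha]
    refine List.Nodup.append h (List.nodup_singleton a) ?_
    intro x hx hm
    rw [List.mem_singleton] at hm
    exact ha (hm ▸ hx)

-- A's inner loop over one uid's ratings, characterized
lemma pvInner (allUid : List String) (hnd : allUid.Nodup) (u : String) (hu : u ∈ allUid)
    (Q : List (String × Int)) (hQ : (Q.map Prod.fst).Nodup)
    (c : String → String → Option Int) (g : String → Option Int)
    (ann : List String) (hA : ann.Nodup)
    (hKeys : ∀ a, a ∉ ann → (∀ v, c a v = none) ∧ g a = none) :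
    Q.foldl (pvStepA allUid u)
      (ann, ann.map (fun a => allUid.map (fun u' => if u' = u then g a else c a u')))
    = (Q.foldl (fun acc q => pvAnnStep acc q.1) ann,
       (Q.foldl (fun acc q => pvAnnStep acc q.1) ann).map
         (fun a => allUid.map (fun u' => if u' = u then
            (match Q.find? (fun q => q.1 = a) with | some q => some q.2 | none => g a)
          else c a u'))) := by
  induction Q generalizing g ann with
  | nil => simp
  | cons q Q' ih =>
    obtain ⟨a, r⟩ := q
    simp only [List.map_cons, List.nodup_cons] at hQ
    obtain ⟨j, hj⟩ : ∃ j, PySem.List.index? allUid u = some j :=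
      Option.isSome_iff_exists.mp ((PySem.List.index?_isSome_iff allUid u).2 hu)
    have hrow : ∀ (b : String),
        (allUid.map (fun u' => if u' = u then g b else c b u')).set j (some r)
          = allUid.map (fun u' => if u' = u then some r else c b u') := by
      intro b
      rw [pv_map_set_index allUid hnd u j hj _ (some r)]
      exact List.map_congr_left (fun u' _ => by by_cases hu' : u' = u <;> simp [hu'])
    have hstep : pvStepA allUid u
        (ann, ann.map (fun b => allUid.map (fun u' => if u' = u then g b else c b u'))) (a, r)
        = (pvAnnStep ann a, (pvAnnStep ann a).map
            (fun b => allUid.map (fun u' => if u' = u then (if b = a then some r else g b) else c b u'))) := by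
      by_cases ha : a ∈ ann
      · obtain ⟨k, hkx⟩ : ∃ k, PySem.List.index? ann a = some k :=
          Option.isSome_iff_exists.mp ((PySem.List.index?_isSome_iff ann a).2 ha)
        simp only [pvStepA, pvAnnStep, if_pos ha, hkx, hj]
        rw [pv_map_modify_index ann hA a k hkx _ (fun row : List (Option Int) => row.set j (some r))]
        refine congrArg (Prod.mk ann) ?_
        refine List.map_congr_left (fun b _ => ?_)
        by_cases hba : b = a
        · subst hba
          rw [if_pos rfl, hrow b]
          exact List.map_congr_left (fun u' _ => by by_cases hu' : u' = u <;> simp [hu'])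
        · rw [if_neg hba]
          exact List.map_congr_left (fun u' _ => by by_cases hu' : u' = u <;> simp [hu', hba])
      · have hFa : (allUid.map (fun u' => if u' = u then g a else c a u'))
            = List.replicate allUid.length (none : Option Int) := by
          rw [show (fun u' => if u' = u then g a else c a u') = fun _ => (none : Option Int) from
            funext (fun u' => by by_cases hu' : u' = u <;> simp [hu', (hKeys a ha).1, (hKeys a ha).2])]
          simp
        have hka : PySem.List.index? (ann ++ [a]) a = some ann.length :=
          PySem.List.index?_append_singleton_self ann a ha
        have hA1 : (ann ++ [a]).Nodup := by
          refine List.Nodup.append hA (List.nodup_singleton a) ?_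
          intro x hx hm
          rw [List.mem_singleton] at hm
          exact ha (hm ▸ hx)
        simp only [pvStepA, pvAnnStep, if_neg ha, hka, hj]
        rw [show ann.map (fun b => allUid.map (fun u' => if u' = u then g b else c b u'))
              ++ [List.replicate allUid.length (none : Option Int)]
            = (ann ++ [a]).map (fun b => allUid.map (fun u' => if u' = u then g b else c b u')) from by
          rw [List.map_append]
          simp [hFa]]
        rw [pv_map_modify_index (ann ++ [a]) hA1 a ann.length hka _ (fun row : List (Option Int) => row.set j (some r))]
        refine congrArg (Prod.mk (ann ++ [a])) ?_
        refine List.map_congr_left (fun b _ => ?_)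
        by_cases hba : b = a
        · subst hba
          rw [if_pos rfl, hrow b]
          exact List.map_congr_left (fun u' _ => by by_cases hu' : u' = u <;> simp [hu'])
        · rw [if_neg hba]
          exact List.map_congr_left (fun u' _ => by by_cases hu' : u' = u <;> simp [hu', hba])
    rw [List.foldl_cons, List.foldl_cons, hstep]
    have hA1 : (pvAnnStep ann a).Nodup := pv_annStep_nodup ann a hA
    have hKeys1 : ∀ b, b ∉ pvAnnStep ann a →
        (∀ v, c b v = none) ∧ (if b = a then some r else g b) = none := by
      intro b hb
      rw [pv_mem_annStep] at hb
      push Not at hb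
      exact ⟨(hKeys b hb.1).1, by simp [hb.2, (hKeys b hb.1).2]⟩
    rw [ih hQ.2 (fun b => if b = a then some r else g b) (pvAnnStep ann a) hA1 hKeys1]
    refine congrArg (Prod.mk _) ?_
    refine List.map_congr_left (fun b _ => ?_)
    refine List.map_congr_left (fun u' _ => ?_)
    by_cases hu' : u' = u
    · simp only [if_pos hu']
      by_cases hba : b = a
      · subst hba
        have hnone : Q'.find? (fun q => q.1 = b) = none :=
          List.find?_eq_none.2 (fun q hq => by
            simp only [decide_eq_true_eq]
            exact fun e => hQ.1 (e ▸ List.mem_map_of_mem hq))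
        simp [hnone]
      · have hhead : (decide ((a, r).1 = b)) = false := by simp [Ne.symm hba]
        simp only [List.find?_cons, hhead]
        cases hf : Q'.find? (fun q => q.1 = b) <;> simp [hba]
    · simp [hu']

lemma pv_annfold_nodup (Q : List (String × Int)) (ann : List String) (h : ann.Nodup) :
    (Q.foldl (fun acc q => pvAnnStep acc q.1) ann).Nodup := by
  induction Q generalizing ann with
  | nil => exact h
  | cons q Q' ih => exact ih _ (pv_annStep_nodup ann q.1 h)

lemma pv_annfold_mem (Q : List (String × Int)) (ann : List String) (x : String) :
    x ∈ Q.foldl (fun acc q => pvAnnStep acc q.1) ann ↔ x ∈ ann ∨ ∃ q ∈ Q, q.1 = x := by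
  induction Q generalizing ann with
  | nil => simp
  | cons q Q' ih =>
    rw [List.foldl_cons, ih, pv_mem_annStep]
    constructor
    · rintro ((hx | rfl) | ⟨q', hq', rfl⟩)
      · exact Or.inl hx
      · exact Or.inr ⟨q, List.mem_cons_self, rfl⟩
      · exact Or.inr ⟨q', List.mem_cons_of_mem q hq', rfl⟩
    · rintro (hx | ⟨q', hq', rfl⟩)
      · exact Or.inl (Or.inl hx)
      · rcases List.mem_cons.1 hq' with rfl | hq'
        · exact Or.inl (Or.inr rfl)
        · exact Or.inr ⟨q', hq', rfl⟩

-- A's outer loop, characterized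
lemma pvOuter (allUid : List String) (hnd : allUid.Nodup)
    (L : List (String × PySem.Dict String Int))
    (hLu : ∀ p ∈ L, p.1 ∈ allUid)
    (hLnd : (L.map Prod.fst).Nodup)
    (hLk : ∀ p ∈ L, (p.2.items.map Prod.fst).Nodup)
    (c : String → String → Option Int) (ann : List String) (hA : ann.Nodup)
    (hC0 : ∀ a, a ∉ ann → ∀ v, c a v = none)
    (hCol : ∀ p ∈ L, ∀ a, c a p.1 = none) :
    L.foldl (fun st p => p.2.items.foldl (pvStepA allUid p.1) st)
      (ann, ann.map (fun a => allUid.map (c a)))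
    = (L.foldl (fun acc p => p.2.items.foldl (fun acc q => pvAnnStep acc q.1) acc) ann,
       (L.foldl (fun acc p => p.2.items.foldl (fun acc q => pvAnnStep acc q.1) acc) ann).map
         (fun a => allUid.map (fun u =>
            match L.find? (fun p => p.1 = u) with
            | some p => p.2.get? a
            | none => c a u))) := by
  induction L generalizing c ann with
  | nil => simp
  | cons p L' ih =>
    obtain ⟨u, d⟩ := p
    simp only [List.map_cons, List.nodup_cons] at hLnd
    have hu : u ∈ allUid := hLu (u, d) List.mem_cons_self
    simp only [List.foldl_cons]
    have hinit : ann.map (fun a => allUid.map (c a))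
        = ann.map (fun a => allUid.map (fun u' => if u' = u then (none : Option Int) else c a u')) := by
      refine List.map_congr_left (fun a _ => ?_)
      refine List.map_congr_left (fun u' _ => ?_)
      by_cases hu' : u' = u
      · rw [if_pos hu', hu']
        exact hCol (u, d) List.mem_cons_self a
      · rw [if_neg hu']
    rw [hinit]
    have hIn := pvInner allUid hnd u hu d.items (hLk (u, d) List.mem_cons_self) c
      (fun _ => (none : Option Int)) ann hA (fun a ha => ⟨hC0 a ha, rfl⟩)
    beta_reduce at hIn
    rw [hIn]
    set ann1 := d.items.foldl (fun acc q => pvAnnStep acc q.1) ann with hann1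
    have hcell : ann1.map (fun a => allUid.map (fun u' => if u' = u then
          (match d.items.find? (fun q => q.1 = a) with | some q => some q.2 | none => (none : Option Int))
        else c a u'))
        = ann1.map (fun a => allUid.map (fun u' =>
            (fun a u' => if u' = u then d.get? a else c a u') a u')) := by
      refine List.map_congr_left (fun a _ => ?_)
      refine List.map_congr_left (fun u' _ => ?_)
      by_cases hu' : u' = u
      · simp only [if_pos hu']
        exact (pv_get?_eq_find d.items a).symm
      · simp only [if_neg hu']
    rw [hcell]
    have hA1 : ann1.Nodup := pv_annfold_nodup d.items ann hA
    have hC0' : ∀ a, a ∉ ann1 → ∀ v, (fun a u' => if u' = u then d.get? a else c a u') a v = none := by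
      intro a ha v
      show (if v = u then d.get? a else c a v) = none
      rw [pv_annfold_mem] at ha
      push Not at ha
      by_cases hv : v = u
      · rw [if_pos hv]
        rw [show d = PySem.Dict.mk d.items from rfl, pv_get?_eq_find]
        rw [List.find?_eq_none.2 (fun q hq => by
          simp only [decide_eq_true_eq]
          exact fun e => (ha.2 q hq) e)]
      · rw [if_neg hv]
        exact hC0 a ha.1 v
    have hCol' : ∀ p ∈ L', ∀ a, (fun a u' => if u' = u then d.get? a else c a u') a p.1 = none := by
      intro p hp a
      show (if p.1 = u then d.get? a else c a p.1) = none
      have hne : p.1 ≠ u := fun e => hLnd.1 (e ▸ List.mem_map_of_mem hp)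
      rw [if_neg hne]
      exact hCol p (List.mem_cons_of_mem _ hp) a
    have hIH := ih (fun p hp => hLu p (List.mem_cons_of_mem _ hp)) hLnd.2
      (fun p hp => hLk p (List.mem_cons_of_mem _ hp))
      (fun a u' => if u' = u then d.get? a else c a u') ann1 hA1 hC0' hCol'
    beta_reduce at hIH
    rw [hIH]
    refine congrArg (Prod.mk _) ?_
    refine List.map_congr_left (fun a _ => ?_)
    refine List.map_congr_left (fun u' _ => ?_)
    by_cases hu' : u' = u
    · have hnone : L'.find? (fun p => p.1 = u) = none :=
        List.find?_eq_none.2 (fun p hp => by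
          simp only [decide_eq_true_eq]
          exact fun e => hLnd.1 (e ▸ List.mem_map_of_mem hp))
      simp [hu', hnone]
    · have hhead : (decide ((u, d).1 = u')) = false := by simp; exact fun e => hu' e.symm
      simp only [List.find?_cons, hhead]
      cases hf : L'.find? (fun p => p.1 = u') <;> simp [hu']

lemma pvFlatten (norm : List (String × PySem.Dict String Int))
    (hnd : (norm.map Prod.fst).Nodup) (annB : List String) :
    (List.range (annB.map (fun a => (norm.map Prod.fst).map (fun u =>
        match norm.find? (fun p => p.1 = u) with | some p => p.2.get? a | none => (none : Option Int)))).length).flatMap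
      (fun (i : Nat) =>
        (List.range ((annB.map (fun a => (norm.map Prod.fst).map (fun u =>
            match norm.find? (fun p => p.1 = u) with | some p => p.2.get? a | none => (none : Option Int)))).getD i []).length).map
          (fun (j : Nat) =>
            [some (PySem.Int.toStr (i : Int)), some (PySem.Int.toStr (j : Int)),
             pvConv (((annB.map (fun a => (norm.map Prod.fst).map (fun u =>
               match norm.find? (fun p => p.1 = u) with | some p => p.2.get? a | none => (none : Option Int)))).getD i []).getD j none)]))
    = (PySem.List.enumerate annB).flatMap (fun ia =>
        (PySem.List.enumerate norm).map (fun jp =>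
          [some (PySem.Int.toStr ia.1), some (PySem.Int.toStr jp.1), pvConv (jp.2.2.get? ia.2)])) := by
  rw [pv_enumerate_eq annB "" 0, pv_enumerate_eq norm ("", PySem.Dict.mk []) 0]
  simp only [zero_add, List.flatMap_map, List.map_map, List.length_map]
  refine pv_flatMap_congr _ _ _ (fun i hi => ?_)
  have hilt : i < annB.length := List.mem_range.1 hi
  have hdata : (annB.map (fun a => norm.map ((fun u =>
      match norm.find? (fun p => p.1 = u) with | some p => p.2.get? a | none => (none : Option Int)) ∘ Prod.fst))).getD i []
      = norm.map ((fun u =>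
          match norm.find? (fun p => p.1 = u) with | some p => p.2.get? annB[i] | none => (none : Option Int)) ∘ Prod.fst) := by
    rw [List.getD_eq_getElem?_getD, List.getElem?_map, List.getElem?_eq_getElem hilt]
    rfl
  rw [hdata]
  simp only [List.length_map]
  refine List.map_congr_left (fun j hj => ?_)
  have hjlt : j < norm.length := List.mem_range.1 hj
  simp only [Function.comp_apply]
  have hcell : (norm.map ((fun u =>
      match norm.find? (fun p => p.1 = u) with | some p => p.2.get? annB[i] | none => (none : Option Int)) ∘ Prod.fst)).getD j none
      = norm[j].2.get? annB[i] := by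
    rw [List.getD_eq_getElem?_getD, List.getElem?_map, List.getElem?_eq_getElem hjlt]
    simp only [Option.map_some, Option.getD_some, Function.comp_apply]
    rw [pv_find?_fst norm hnd j hjlt]
  rw [hcell]
  have hB1 : annB.getD i "" = annB[i] := by
    rw [List.getD_eq_getElem?_getD, List.getElem?_eq_getElem hilt]
    rfl
  have hB2 : norm.getD j ("", PySem.Dict.mk []) = norm[j] := by
    rw [List.getD_eq_getElem?_getD, List.getElem?_eq_getElem hjlt]
    rfl
  rw [hB1, hB2]

-- ===== VERDICT (by name: the statement is the Claim_ definition above) =====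
theorem annotation_per_annotator2task_data_spec : Claim_equal_annotation_per_annotator2task_data := by
  intro annotations _
  show annotation_per_annotator2task_data annotations = annotation_per_annotator2task_data_alt annotations
  simp only [annotation_per_annotator2task_data, annotation_per_annotator2task_data_alt]
  set norm := pvNorm annotations with hnorm
  have hnd : (norm.map Prod.fst).Nodup := by
    have h1 : norm.map Prod.fst = (PySem.Dict.ofList annotations).items.map (fun x => x.1) := by
      rw [hnorm]
      simp only [pvNorm, List.map_map]
      rfl
    rw [h1]
    exact PySem.Dict.nodup_keys_ofList annotations
  have hLu : ∀ p ∈ norm, p.1 ∈ norm.map Prod.fst := fun p hp => List.mem_map_of_mem hp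
  have hLk : ∀ p ∈ norm, (p.2.items.map Prod.fst).Nodup := by
    intro p hp
    rw [hnorm] at hp
    simp only [pvNorm, List.mem_map] at hp
    obtain ⟨x, hx, hxe⟩ := hp
    rw [← hxe]
    exact PySem.Dict.nodup_keys_ofList x.2
  have hOut := pvOuter (norm.map Prod.fst) hnd norm hLu hnd hLk (fun _ _ => none) []
    List.nodup_nil (fun a _ v => rfl) (fun p _ a => rfl)
  have hOut2 : norm.foldl (fun st p => p.2.items.foldl (pvStepA (norm.map Prod.fst) p.1) st)
      (([] : List String), ([] : List (List (Option Int))))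
      = (norm.foldl (fun acc p => p.2.items.foldl (fun acc q => pvAnnStep acc q.1) acc) [],
         (norm.foldl (fun acc p => p.2.items.foldl (fun acc q => pvAnnStep acc q.1) acc) []).map
           (fun a => (norm.map Prod.fst).map (fun u =>
              match norm.find? (fun p => p.1 = u) with
              | some p => p.2.get? a
              | none => (none : Option Int)))) := hOut
  rw [hOut2]
  have hBfold : norm.foldl (fun acc p => p.2.keys.foldl pvAnnStep acc) []
      = norm.foldl (fun acc p => p.2.items.foldl (fun acc q => pvAnnStep acc q.1) acc) [] := by
    congr 1
    funext acc p
    rw [show p.2.keys = p.2.items.map (fun x => x.1) from rfl, List.foldl_map]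
  rw [hBfold]
  exact pvFlatten norm hnd _
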